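-- pv_equiv track=rewrite | github.com/jamiebarker0310/AdventOfCode2023 | aoc/day_12.py | check_arrangement
-- ===== SOURCE A (Python) =====
-- def check_arrangement(code, arrangements):
--
--     total = 0
--     calc_arrs = []
--     for c in code:
--         if c == ".":
--             if total !=0:
--                 calc_arrs.append(total)
--             total = 0
--         elif c == "#":
--             total += 1
--         else:
--             raise ValueError(c)
--     if total !=0:
--         calc_arrs.append(total)
--     return calc_arrs == arrangements
-- ===== SOURCE B (Python) =====
-- def check_arrangement(code, arrangements):
--     for c in code:
--         if c not in ".#":
--             raise ValueError(c)
--     return [len(g) for g in code.split(".") if g] == arrangements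
-- ===== Notes on version B (the rewrite author's own statement) =====
-- stated objective: idiomatic
-- what changed: Replaces the manual run-length accumulator loop with a validation pass plus str.split('.') and a comprehension over the nonempty pieces.
import Mathlib
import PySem

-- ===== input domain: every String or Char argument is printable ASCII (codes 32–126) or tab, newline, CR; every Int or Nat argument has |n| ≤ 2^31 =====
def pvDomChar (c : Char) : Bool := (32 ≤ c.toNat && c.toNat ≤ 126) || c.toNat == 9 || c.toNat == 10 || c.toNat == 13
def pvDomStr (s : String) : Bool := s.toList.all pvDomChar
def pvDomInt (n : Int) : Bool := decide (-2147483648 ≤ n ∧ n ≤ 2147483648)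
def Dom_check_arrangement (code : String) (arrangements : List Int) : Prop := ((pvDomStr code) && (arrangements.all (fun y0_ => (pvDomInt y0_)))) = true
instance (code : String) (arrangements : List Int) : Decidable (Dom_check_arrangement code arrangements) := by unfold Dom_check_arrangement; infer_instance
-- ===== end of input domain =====

-- B replaces A's manual run-length accumulator with a validation pass plus split('.') over
-- the string and a comprehension keeping the nonempty pieces (idiomatic; same cost).

-- ===== PORT A =====
-- A's for-loop over the characters with state (total, calc_arrs); the 'else: raise ValueError(c)'
-- branch becomes none (such inputs are excluded by Pre_check_arrangement).
def checkArrGoA : List Char → Int → List Int → Option (List Int)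
  | [], total, calc_arrs =>
      some (if total ≠ 0 then calc_arrs ++ [total] else calc_arrs)
  | c :: cs, total, calc_arrs =>
      if c = '.' then
        checkArrGoA cs 0 (if total ≠ 0 then calc_arrs ++ [total] else calc_arrs)
      else if c = '#' then
        checkArrGoA cs (total + 1) calc_arrs
      else
        none  -- raise ValueError(c)

def check_arrangement (code : String) (arrangements : List Int) : Bool :=
  match checkArrGoA code.toList 0 [] with
  | some calc_arrs => decide (calc_arrs = arrangements)
  | none => false  -- unreachable under Pre_check_arrangement (Python raises ValueError)

-- ===== PORT B =====
def check_arrangement_alt (code : String) (arrangements : List Int) : Bool :=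
  -- validation loop: `raise ValueError(c)` ported as false (excluded by Pre_check_arrangement)
  if code.toList.all (fun c => c == '.' || c == '#') then
    -- [len(g) for g in code.split(".") if g] == arrangements
    decide ((((code.toList.splitOn '.').filter (fun g => !g.isEmpty)).map
              (fun g => (g.length : Int))) = arrangements)
  else false

-- ===== PRECONDITION & SPEC =====
-- Pre_ excludes exactly the inputs on which A raises ValueError: a character other than '.' or '#'.
def Pre_check_arrangement (code : String) (arrangements : List Int) : Prop :=
  (code.toList.all (fun c => c == '.' || c == '#')) = true
instance (code : String) (arrangements : List Int) : Decidable (Pre_check_arrangement code arrangements) := by unfold Pre_check_arrangement; infer_instance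
def pvWitness_check_arrangement : String × List Int := (".##.#", [2, 1])

def Spec_check_arrangement (code : String) (arrangements : List Int) (out : Bool) : Prop := out = check_arrangement_alt code arrangements
instance (code : String) (arrangements : List Int) (out : Bool) : Decidable (Spec_check_arrangement code arrangements out) := by unfold Spec_check_arrangement; infer_instance

-- ===== CLAIM (what is proved, stated in full; the proofs are below) =====
def Claim_equal_check_arrangement : Prop := ∀ (code : String) (arrangements : List Int), Dom_check_arrangement code arrangements → Pre_check_arrangement code arrangements → Spec_check_arrangement code arrangements (check_arrangement code arrangements)

-- ===== LEMMAS AND PROOFS =====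

-- B's groups, with an open run of length `total` pending: the head group of the split absorbs it.
def checkArrFAux (total : Int) (cs : List Char) : List Int :=
  let gs := cs.splitOn '.'
  (if total + ((gs.headD []).length : Int) ≠ 0 then [total + ((gs.headD []).length : Int)] else [])
    ++ (gs.tail.filter (fun g => !g.isEmpty)).map (fun g => (g.length : Int))

theorem checkArrFilterMap (h : List Char) (t : List (List Char)) :
    (((h :: t).filter (fun g => !g.isEmpty)).map (fun g => (g.length : Int)))
      = (if (h.length : Int) ≠ 0 then [(h.length : Int)] else [])
        ++ ((t.filter (fun g => !g.isEmpty)).map (fun g => (g.length : Int))) := by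
  cases h with
  | nil => simp
  | cons a l => simp; rw [if_neg (by omega)]; simp

theorem checkArrSplit_ne_nil (cs : List Char) : cs.splitOn '.' ≠ [] :=
  List.splitOnP_ne_nil _ _

theorem checkArrFAux_dot (total : Int) (cs : List Char) :
    checkArrFAux total ('.' :: cs)
      = (if total ≠ 0 then [total] else []) ++ checkArrFAux 0 cs := by
  have hsplit : ('.' :: cs).splitOn '.' = [] :: cs.splitOn '.' := by
    simp [List.splitOn, List.splitOnP_cons]
  rcases hne : cs.splitOn '.' with _ | ⟨h, t⟩
  · exact absurd hne (checkArrSplit_ne_nil cs)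
  · simp only [checkArrFAux, hsplit, hne, List.headD, List.tail, checkArrFilterMap,
      List.length_nil, Nat.cast_zero, add_zero, zero_add]

theorem checkArrFAux_hash (total : Int) (cs : List Char) :
    checkArrFAux total ('#' :: cs) = checkArrFAux (total + 1) cs := by
  have hsplit : ('#' :: cs).splitOn '.'
      = ((cs.splitOn '.').modifyHead (List.cons '#')) := by
    simp [List.splitOn, List.splitOnP_cons]
  rcases hne : cs.splitOn '.' with _ | ⟨h, t⟩
  · exact absurd hne (checkArrSplit_ne_nil cs)
  · simp only [checkArrFAux, hsplit, hne, List.modifyHead, List.headD, List.tail]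
    have : total + ((('#' :: h) : List Char).length : Int) = total + 1 + (h.length : Int) := by
      simp; omega
    rw [this]

theorem checkArrGoA_eq (cs : List Char) : ∀ (total : Int) (acc : List Int),
    (∀ c ∈ cs, c = '.' ∨ c = '#') →
    checkArrGoA cs total acc = some (acc ++ checkArrFAux total cs) := by
  induction cs with
  | nil =>
    intro total acc _
    have : checkArrFAux total [] = if total ≠ 0 then [total] else [] := by
      simp [checkArrFAux, List.splitOn, List.splitOnP_nil]
    rw [checkArrGoA, this]
    split_ifs <;> simp
  | cons c cs ih =>
    intro total acc hvalid
    have hrest : ∀ x ∈ cs, x = '.' ∨ x = '#' := fun x hx => hvalid x (by simp [hx])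
    rcases hvalid c (by simp) with hc | hc <;> subst hc
    · rw [checkArrGoA, if_pos rfl, ih 0 _ hrest, checkArrFAux_dot]
      split_ifs <;> simp
    · rw [checkArrGoA, if_neg (by decide), if_pos rfl, ih (total + 1) _ hrest,
        checkArrFAux_hash]

theorem checkArrFAux_zero (cs : List Char) :
    checkArrFAux 0 cs = ((cs.splitOn '.').filter (fun g => !g.isEmpty)).map
      (fun g => (g.length : Int)) := by
  rcases hne : cs.splitOn '.' with _ | ⟨h, t⟩
  · exact absurd hne (checkArrSplit_ne_nil cs)
  · simp only [checkArrFAux, hne, List.headD, List.tail, checkArrFilterMap, zero_add]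

-- ===== VERDICT (by name: the statement is the Claim_ definition above) =====
theorem check_arrangement_spec : Claim_equal_check_arrangement := by
  intro code arrangements _ hpre
  unfold Spec_check_arrangement check_arrangement check_arrangement_alt
  have hpre' : ∀ c ∈ code.toList, c = '.' ∨ c = '#' := by
    intro c hc
    have := List.all_eq_true.mp hpre c hc
    simpa using this
  rw [checkArrGoA_eq code.toList 0 [] hpre', hpre]
  simp [checkArrFAux_zero]
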